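-- pv_equiv track=rewrite | github.com/grifmang/AOC2021 | Day Three/day3part2.py | part1
-- ===== SOURCE A (Python) =====
-- from dataclasses import dataclass
--
-- @dataclass
-- class Counter:
--     zeros: int = 0
--     ones: int = 0
--
--     def common(self):
--         return 0 if self.zeros > self.ones else 1
--
--     def least_common(self):
--         return 1 if self.zeros > self.ones else 0
--
-- def to_decimal(string):
--     res = 0
--     for i, bit in enumerate(string[::-1]):
--         if int(bit) == 1:
--             res = res + pow(2,i)
--     return res
--
-- def part1(input):
--     counts = [Counter() for i in range(len(input[0]))]
--     for report in input:
--         for i, bit in enumerate(report):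
--             if bit == "0":
--                 counts[i].zeros += 1
--             elif bit == "1":
--                 counts[i].ones += 1
--             else:
--                 raise ValueError()
--     gamma = "".join([str(count.common()) for count in counts])
--     epsilon = "".join([str(count.least_common()) for count in counts])
--     gamma_rate = to_decimal(gamma)
--     epsilon_rate = to_decimal(epsilon)
--     return gamma_rate * epsilon_rate
-- ===== SOURCE B (Python) =====
-- def part1(input):
--     m = len(input[0])
--     ones = [0] * m
--     tot = [0] * m
--     for report in input:
--         for i, c in enumerate(report):
--             if c == '1':
--                 ones[i] += 1
--             elif c != '0':
--                 raise ValueError()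
--             tot[i] += 1
--     gamma = 0
--     for o, t in zip(ones, tot):
--         gamma = 2 * gamma + (1 if 2 * o >= t else 0)
--     return gamma * ((1 << m) - 1 - gamma)
-- ===== Notes on version B (the rewrite author's own statement) =====
-- stated objective: simpler
-- what changed: Replaces the per-column zero/one Counter dataclass and the two bit-string builds with to_decimal conversions by a single ones/total tally, building the gamma integer directly MSB-first and deriving epsilon arithmetically as the bitwise complement (1<<m)-1-gamma.
import Mathlib
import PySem

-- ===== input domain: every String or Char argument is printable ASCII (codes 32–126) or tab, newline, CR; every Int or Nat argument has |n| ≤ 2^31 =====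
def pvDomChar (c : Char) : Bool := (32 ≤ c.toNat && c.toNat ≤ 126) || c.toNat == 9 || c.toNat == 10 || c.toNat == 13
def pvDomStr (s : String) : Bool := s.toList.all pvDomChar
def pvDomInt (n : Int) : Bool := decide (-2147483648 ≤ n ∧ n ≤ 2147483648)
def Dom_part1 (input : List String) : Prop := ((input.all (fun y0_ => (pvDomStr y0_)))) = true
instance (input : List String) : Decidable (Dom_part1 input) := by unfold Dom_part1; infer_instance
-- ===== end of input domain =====

-- B replaces A's per-column zero/one counters plus two bit-string/to_decimal passes by a ones/total
-- tally, building gamma as an integer directly and deriving epsilon as the arithmetic complement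
-- (1<<m)-1-gamma (objective: simpler). Equality is proved on Pre_: nonempty input, rows of
-- '0'/'1' no longer than the first row (elsewhere the Python raises).

-- ===== PORT A =====

-- counts[i] .zeros += / .ones += : modify index i, none = IndexError
def pvModify? {α : Type} (l : List α) (i : Nat) (f : α → α) : Option (List α) :=
  match l, i with
  | [], _ => none
  | x :: xs, 0 => some (f x :: xs)
  | x :: xs, n+1 => (pvModify? xs n f).map (x :: ·)

-- Counter.common / Counter.least_common on (zeros, ones)
def pvCommon (p : Int × Int) : Int := if p.1 > p.2 then 0 else 1
def pvLeastCommon (p : Int × Int) : Int := if p.1 > p.2 then 1 else 0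

-- to_decimal: string[::-1] is .toList.reverse (PySem.List.slice?_none_none_neg_one);
-- int(bit) == 1 tested as bit = '1' (the argument strings hold only '0'/'1'); pow(2,i) with
-- the enumerate index i ≥ 0
def pvToDecimal (s : String) : Int :=
  (PySem.List.enumerate s.toList.reverse 0).foldl
    (fun res p => if p.2 = '1' then res + 2 ^ p.1.toNat else res) 0

-- inner loop: for i, bit in enumerate(report)
def pvProcChars (counts : List (Int × Int)) (cs : List Char) (i : Nat) :
    Option (List (Int × Int)) :=
  match cs with
  | [] => some counts
  | c :: rest =>
    if c = '0' then
      match pvModify? counts i (fun p => (p.1 + 1, p.2)) with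
      | none => none
      | some cts => pvProcChars cts rest (i+1)
    else if c = '1' then
      match pvModify? counts i (fun p => (p.1, p.2 + 1)) with
      | none => none
      | some cts => pvProcChars cts rest (i+1)
    else none   -- raise ValueError()

-- outer loop: for report in input
def pvProcReports (counts : List (Int × Int)) (reports : List String) :
    Option (List (Int × Int)) :=
  match reports with
  | [] => some counts
  | r :: rs =>
    match pvProcChars counts r.toList 0 with
    | none => none
    | some cts => pvProcReports cts rs

def part1 (input : List String) : Int :=
  match PySem.List.pyGet? input 0 with
  | none => 0      -- len(input[0]) raises IndexError: outside Pre_part1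
  | some first =>
    match pvProcReports (List.replicate first.toList.length ((0:Int), (0:Int))) input with
    | none => 0    -- ValueError / IndexError: outside Pre_part1
    | some counts =>
      let gamma := PySem.Str.join "" (counts.map (fun c => PySem.Int.toStr (pvCommon c)))
      let epsilon := PySem.Str.join "" (counts.map (fun c => PySem.Int.toStr (pvLeastCommon c)))
      pvToDecimal gamma * pvToDecimal epsilon

-- ===== PORT B =====

-- inner loop of Source B: ones[i] += 1 on '1', ValueError on anything but '0'/'1', tot[i] += 1
def pvTallyChars (ones tot : List Int) (cs : List Char) (i : Nat) :
    Option (List Int × List Int) :=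
  match cs with
  | [] => some (ones, tot)
  | c :: rest =>
    if c = '1' then
      match pvModify? ones i (· + 1) with
      | none => none
      | some ones' =>
        match pvModify? tot i (· + 1) with
        | none => none
        | some tot' => pvTallyChars ones' tot' rest (i+1)
    else if c = '0' then
      match pvModify? tot i (· + 1) with
      | none => none
      | some tot' => pvTallyChars ones tot' rest (i+1)
    else none

def pvTallyReports (ones tot : List Int) (reports : List String) :
    Option (List Int × List Int) :=
  match reports with
  | [] => some (ones, tot)
  | r :: rs =>
    match pvTallyChars ones tot r.toList 0 with
    | none => none
    | some p => pvTallyReports p.1 p.2 rs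

def part1_alt (input : List String) : Int :=
  match PySem.List.pyGet? input 0 with
  | none => 0      -- len(input[0]) raises IndexError: outside Pre_part1
  | some first =>
    let m := first.toList.length
    match pvTallyReports (List.replicate m 0) (List.replicate m 0) input with
    | none => 0    -- ValueError / IndexError: outside Pre_part1
    | some p =>
      let gamma : Int := (p.1.zip p.2).foldl
        (fun g q => 2 * g + if 2 * q.1 ≥ q.2 then 1 else 0) 0
      gamma * (((1 : Int) <<< m) - 1 - gamma)

-- ===== PRECONDITION & SPEC =====
-- Pre_: exactly where the Python A returns: nonempty input, every row made of '0'/'1' only and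
-- no longer than the first row (otherwise A raises IndexError or ValueError).
def Pre_part1 (input : List String) : Prop :=
  input ≠ [] ∧ ∀ s ∈ input,
    s.toList.length ≤ input.headI.toList.length ∧
      (s.toList.all (fun c => c = '0' || c = '1')) = true
instance (input : List String) : Decidable (Pre_part1 input) := by
  unfold Pre_part1; infer_instance

def pvWitness_part1 : List String := ["01", "10"]

def Spec_part1 (input : List String) (out : Int) : Prop := out = part1_alt input
instance (input : List String) (out : Int) : Decidable (Spec_part1 input out) := by
  unfold Spec_part1; infer_instance

-- ===== CLAIM (what is proved, stated in full; the proofs are below) =====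
def Claim_equal_part1 : Prop :=
  ∀ (input : List String), Dom_part1 input → Pre_part1 input → Spec_part1 input (part1 input)

-- ===== LEMMAS AND PROOFS =====

theorem pvModify?_length {α : Type} {l l' : List α} {i : Nat} {f : α → α}
    (h : pvModify? l i f = some l') : l'.length = l.length := by
  induction l generalizing i l' with
  | nil => simp [pvModify?] at h
  | cons x xs ih =>
    cases i with
    | zero => simp [pvModify?] at h; subst h; simp
    | succ n =>
      simp only [pvModify?, Option.map_eq_some_iff] at h
      obtain ⟨ys, hy, rfl⟩ := h
      simp [ih hy]

theorem pvModify?_some {α : Type} {l : List α} {i : Nat} (f : α → α) (h : i < l.length) :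
    ∃ l', pvModify? l i f = some l' := by
  induction l generalizing i with
  | nil => simp at h
  | cons x xs ih =>
    cases i with
    | zero => exact ⟨f x :: xs, rfl⟩
    | succ n =>
      obtain ⟨l', hl'⟩ := ih (by simpa using h)
      exact ⟨x :: l', by simp [pvModify?, hl']⟩

theorem pvModify?_map {α β : Type} (g : α → β) {f : α → α} (f' : β → β)
    (hfg : ∀ x, g (f x) = f' (g x)) {l l' : List α} {i : Nat}
    (h : pvModify? l i f = some l') : pvModify? (l.map g) i f' = some (l'.map g) := by
  induction l generalizing i l' with
  | nil => simp [pvModify?] at h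
  | cons x xs ih =>
    cases i with
    | zero => simp [pvModify?] at h; subst h; simp [pvModify?, hfg]
    | succ n =>
      simp only [pvModify?, Option.map_eq_some_iff] at h
      obtain ⟨ys, hy, rfl⟩ := h
      simp [pvModify?, ih hy]

theorem pvModify?_map_const {α β : Type} (g : α → β) {f : α → α}
    (hfg : ∀ x, g (f x) = g x) {l l' : List α} {i : Nat}
    (h : pvModify? l i f = some l') : l'.map g = l.map g := by
  induction l generalizing i l' with
  | nil => simp [pvModify?] at h
  | cons x xs ih =>
    cases i with
    | zero => simp [pvModify?] at h; subst h; simp [hfg]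
    | succ n =>
      simp only [pvModify?, Option.map_eq_some_iff] at h
      obtain ⟨ys, hy, rfl⟩ := h
      simp [ih hy]

theorem pvTallyChars_cons0 {tot tot' : List Int} {i : Nat} {ones : List Int}
    {rest : List Char} (h : pvModify? tot i (· + 1) = some tot') :
    pvTallyChars ones tot ('0' :: rest) i = pvTallyChars ones tot' rest (i + 1) := by
  simp [pvTallyChars, h]

theorem pvTallyChars_cons1 {ones ones' tot tot' : List Int} {i : Nat}
    {rest : List Char} (h1 : pvModify? ones i (· + 1) = some ones')
    (h2 : pvModify? tot i (· + 1) = some tot') :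
    pvTallyChars ones tot ('1' :: rest) i = pvTallyChars ones' tot' rest (i + 1) := by
  simp [pvTallyChars, h1, h2]

-- simulation: B's tally is the (ones, zeros+ones) projection of A's counters
theorem pvTally_sim_chars {cs : List Char} :
    ∀ {counts counts' : List (Int × Int)} {i : Nat},
    pvProcChars counts cs i = some counts' →
    pvTallyChars (counts.map Prod.snd) (counts.map (fun p => p.1 + p.2)) cs i
      = some (counts'.map Prod.snd, counts'.map (fun p => p.1 + p.2)) := by
  induction cs with
  | nil => intro counts counts' i h; simp [pvProcChars] at h; subst h; rfl
  | cons c rest ih =>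
    intro counts counts' i h
    by_cases h0 : c = '0'
    · subst h0
      simp only [pvProcChars] at h
      cases hm : pvModify? counts i (fun p : Int × Int => (p.1 + 1, p.2)) with
      | none => rw [hm] at h; simp at h
      | some cts =>
      rw [hm] at h; simp at h
      have hrec : pvProcChars cts rest (i + 1) = some counts' := h
      have htot := pvModify?_map (fun p : Int × Int => p.1 + p.2) (· + 1)
        (by intro x; ring) hm
      have hones := pvModify?_map_const (Prod.snd) (by intro x; rfl) hm
      rw [pvTallyChars_cons0 htot, ← hones]
      exact ih hrec
    · by_cases h1 : c = '1'
      · subst h1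
        simp only [pvProcChars, if_neg h0] at h
        cases hm : pvModify? counts i (fun p : Int × Int => (p.1, p.2 + 1)) with
        | none => rw [hm] at h; simp at h
        | some cts =>
        rw [hm] at h; simp at h
        have hrec : pvProcChars cts rest (i + 1) = some counts' := h
        have hones := pvModify?_map (Prod.snd) (· + 1) (by intro x; rfl) hm
        have htot := pvModify?_map (fun p : Int × Int => p.1 + p.2) (· + 1)
          (by intro x; ring) hm
        rw [pvTallyChars_cons1 hones htot]
        exact ih hrec
      · simp [pvProcChars, h0, h1] at h

theorem pvTally_sim_reports {reports : List String} :
    ∀ {counts counts' : List (Int × Int)},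
    pvProcReports counts reports = some counts' →
    pvTallyReports (counts.map Prod.snd) (counts.map (fun p => p.1 + p.2)) reports
      = some (counts'.map Prod.snd, counts'.map (fun p => p.1 + p.2)) := by
  induction reports with
  | nil => intro counts counts' h; simp [pvProcReports] at h; subst h; rfl
  | cons r rs ih =>
    intro counts counts' h
    simp only [pvProcReports] at h
    cases hc : pvProcChars counts r.toList 0 with
    | none => rw [hc] at h; simp at h
    | some cts =>
    rw [hc] at h; simp at h
    have hrec : pvProcReports cts rs = some counts' := h
    simp only [pvTallyReports, pvTally_sim_chars hc]
    exact ih hrec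

-- success of A's loops on Pre_ inputs
theorem pvProcChars_some {cs : List Char} :
    ∀ {counts : List (Int × Int)} {i : Nat},
    (∀ c ∈ cs, c = '0' ∨ c = '1') → i + cs.length ≤ counts.length →
    ∃ counts', pvProcChars counts cs i = some counts' ∧ counts'.length = counts.length := by
  induction cs with
  | nil => intro counts i _ _; exact ⟨counts, rfl, rfl⟩
  | cons c rest ih =>
    intro counts i hok hlen
    have hi : i < counts.length := by simp at hlen; omega
    rcases hok c (by simp) with h0 | h1
    · subst h0
      obtain ⟨cts, hm⟩ := pvModify?_some (fun p : Int × Int => (p.1 + 1, p.2)) hi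
      have hl := pvModify?_length hm
      obtain ⟨counts', hrec, hlen'⟩ := ih (fun c hc => hok c (by simp [hc]))
        (by simp at hlen ⊢; omega : i + 1 + rest.length ≤ cts.length)
      exact ⟨counts', by simp [pvProcChars, hm, hrec], by omega⟩
    · subst h1
      obtain ⟨cts, hm⟩ := pvModify?_some (fun p : Int × Int => (p.1, p.2 + 1)) hi
      have hl := pvModify?_length hm
      obtain ⟨counts', hrec, hlen'⟩ := ih (fun c hc => hok c (by simp [hc]))
        (by simp at hlen ⊢; omega : i + 1 + rest.length ≤ cts.length)
      exact ⟨counts', by simp [pvProcChars, hm, hrec], by omega⟩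

theorem pvProcReports_some {reports : List String} :
    ∀ {counts : List (Int × Int)},
    (∀ s ∈ reports, s.toList.length ≤ counts.length ∧ ∀ c ∈ s.toList, c = '0' ∨ c = '1') →
    ∃ counts', pvProcReports counts reports = some counts' ∧ counts'.length = counts.length := by
  induction reports with
  | nil => intro counts _; exact ⟨counts, rfl, rfl⟩
  | cons r rs ih =>
    intro counts hok
    obtain ⟨hlen, hchars⟩ := hok r (by simp)
    obtain ⟨cts, hc, hlc⟩ := pvProcChars_some (i := 0) hchars (by simpa using hlen)
    obtain ⟨counts', hrec, hlen'⟩ := ih (counts := cts) (fun s hs => by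
      obtain ⟨h1, h2⟩ := hok s (by simp [hs]); exact ⟨by omega, h2⟩)
    exact ⟨counts', by simp [pvProcReports, hc, hrec], by omega⟩

-- bit value of a character
def pvBitc (c : Char) : Int := if c = '1' then 1 else 0

-- LSB-first value of a bit string
def pvLsb : List Char → Int
  | [] => 0
  | c :: r => pvBitc c + 2 * pvLsb r

theorem pvLsb_append (xs : List Char) (c : Char) :
    pvLsb (xs ++ [c]) = pvLsb xs + pvBitc c * 2 ^ xs.length := by
  induction xs with
  | nil => simp [pvLsb]
  | cons x t ih => simp [pvLsb, ih]; ring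

theorem pvToDecimal_enum (l : List Char) :
    ∀ (k : Nat) (r : Int),
    (PySem.List.enumerate l (k : Int)).foldl
      (fun res p => if p.2 = '1' then res + 2 ^ p.1.toNat else res) r
      = r + 2 ^ k * pvLsb l := by
  induction l with
  | nil => intro k r; simp [PySem.List.enumerate_nil, pvLsb]
  | cons c rest ih =>
    intro k r
    rw [PySem.List.enumerate_cons]
    have : ((k : Int) + 1) = ((k + 1 : Nat) : Int) := by push_cast; ring
    simp only [List.foldl_cons, this, ih]
    by_cases h : c = '1' <;> simp [h, pvLsb, pvBitc, Int.toNat_natCast] <;> try ring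

theorem pvMsb_foldl (l : List Char) :
    ∀ (a : Int), l.foldl (fun g c => 2 * g + pvBitc c) a = a * 2 ^ l.length + pvLsb l.reverse := by
  induction l with
  | nil => intro a; simp [pvLsb]
  | cons c rest ih =>
    intro a
    simp only [List.foldl_cons, ih, List.reverse_cons, pvLsb_append, List.length_cons,
      List.length_reverse]
    ring

theorem pvToDecimal_eq (s : String) :
    pvToDecimal s = s.toList.foldl (fun g c => 2 * g + pvBitc c) 0 := by
  have h0 : (0 : Int) = ((0 : Nat) : Int) := rfl
  rw [pvToDecimal, h0, pvToDecimal_enum, pvMsb_foldl]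
  simp

-- the joined string of single-digit common()/least_common() values, as a char list
theorem pvJoin_toList (counts : List (Int × Int)) (f : Int × Int → Int)
    (hf : ∀ p, f p = 0 ∨ f p = 1) :
    (PySem.Str.join "" (counts.map (fun c => PySem.Int.toStr (f c)))).toList
      = counts.map (fun c => if f c = 1 then '1' else '0') := by
  have h : ∀ p : Int × Int, (PySem.Int.toStr (f p)).toList = [if f p = 1 then '1' else '0'] := by
    intro p
    rcases hf p with h | h <;> rw [h]
    · rw [if_neg (by norm_num : ¬(0:Int) = 1)]; decide
    · rw [if_pos rfl]; decide
  rw [PySem.Str.toList_join]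
  simp only [List.map_map, Function.comp_def, h]
  have := PySem.Chars.join_nil_singletons (counts.map (fun c => if f c = 1 then '1' else '0'))
  simpa [List.map_map] using this

-- gamma + epsilon = 2^n - 1 (each column contributes complementary bits)
theorem pvSum_complement (l : List (Int × Int)) :
    ∀ (a b : Int),
    l.foldl (fun g c => 2 * g + pvBitc (if pvCommon c = 1 then '1' else '0')) a
      + l.foldl (fun g c => 2 * g + pvBitc (if pvLeastCommon c = 1 then '1' else '0')) b
      = (a + b + 1) * 2 ^ l.length - 1 := by
  induction l with
  | nil => intro a b; simp
  | cons p rest ih =>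
    intro a b
    simp only [List.foldl_cons, ih, List.length_cons]
    have : pvBitc (if pvCommon p = 1 then '1' else '0')
        + pvBitc (if pvLeastCommon p = 1 then '1' else '0') = 1 := by
      simp only [pvCommon, pvLeastCommon]
      by_cases h : p.1 > p.2 <;> simp [h, pvBitc]
    have e : (2 * a + pvBitc (if pvCommon p = 1 then '1' else '0')
        + (2 * b + pvBitc (if pvLeastCommon p = 1 then '1' else '0')) + 1)
        = 2 * (a + b + 1) := by omega
    rw [e]; ring

theorem pvShift_one (m : Nat) : ((1 : Int) <<< m) = 2 ^ m := by
  simpa using Int.shiftLeft_eq 1 m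

-- ===== VERDICT (by name: the statement is the Claim_ definition above) =====
theorem part1_spec : Claim_equal_part1 := by
  intro input _ hpre
  obtain ⟨hne, hrows⟩ := hpre
  obtain ⟨first, rest, rfl⟩ : ∃ f r, input = f :: r := by
    cases input with
    | nil => exact absurd rfl hne
    | cons f r => exact ⟨f, r, rfl⟩
  have hhead : (first :: rest).headI = first := rfl
  rw [hhead] at hrows
  set m := first.toList.length with hm
  -- A's loops succeed
  obtain ⟨counts, hproc, hlen⟩ := pvProcReports_some
    (counts := List.replicate m ((0:Int), (0:Int)))
    (fun s hs => by
      obtain ⟨h1, h2⟩ := hrows s hs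
      refine ⟨by simpa using h1, fun c hc => ?_⟩
      simpa using (List.all_eq_true.mp h2) c hc)
  have hsim := pvTally_sim_reports hproc
  have hrepl1 : (List.replicate m ((0:Int), (0:Int))).map Prod.snd = List.replicate m (0:Int) := by
    simp
  have hrepl2 : (List.replicate m ((0:Int), (0:Int))).map (fun p => p.1 + p.2)
      = List.replicate m (0:Int) := by simp
  rw [hrepl1, hrepl2] at hsim
  show part1 (first :: rest) = part1_alt (first :: rest)
  rw [part1, part1_alt]
  rw [PySem.List.pyGet?_zero_cons]
  simp only [← hm, hproc, hsim]
  -- both sides as folds over counts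
  rw [pvToDecimal_eq, pvToDecimal_eq,
    pvJoin_toList counts pvCommon (fun p => by unfold pvCommon; split <;> simp),
    pvJoin_toList counts pvLeastCommon (fun p => by unfold pvLeastCommon; split <;> simp),
    List.foldl_map, List.foldl_map]
  have hzip : (counts.map Prod.snd).zip (counts.map (fun p => p.1 + p.2))
      = counts.map (fun p => (p.2, p.1 + p.2)) := List.zip_map' ..
  rw [hzip, List.foldl_map]
  have hbit : ∀ (g : Int) (p : Int × Int),
      2 * g + (if 2 * p.2 ≥ p.1 + p.2 then 1 else 0)
        = 2 * g + pvBitc (if pvCommon p = 1 then '1' else '0') := by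
    intro g p
    by_cases h : p.1 > p.2
    · rw [if_neg (show ¬(2 * p.2 ≥ p.1 + p.2) by omega)]; simp [pvCommon, pvBitc, h]
    · rw [if_pos (show 2 * p.2 ≥ p.1 + p.2 by omega)]; simp [pvCommon, pvBitc, h]
  have hfold : counts.foldl (fun g p => 2 * g + if 2 * p.2 ≥ p.1 + p.2 then 1 else 0) 0
      = counts.foldl (fun g p => 2 * g + pvBitc (if pvCommon p = 1 then '1' else '0')) 0 :=
    PySem.List.foldl_congr_mem _ _ _ _ (fun acc x _ => hbit acc x)
  rw [hfold]
  set G := counts.foldl (fun g p => 2 * g + pvBitc (if pvCommon p = 1 then '1' else '0')) 0 with hG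
  set E := counts.foldl (fun g p => 2 * g + pvBitc (if pvLeastCommon p = 1 then '1' else '0')) 0 with hE
  have hsum := pvSum_complement counts 0 0
  rw [← hG, ← hE] at hsum
  have hlen2 : counts.length = m := by simpa using hlen
  rw [hlen2] at hsum
  rw [pvShift_one]
  have hEeq : E = 2 ^ m - 1 - G := by linarith [hsum]
  rw [hEeq]
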